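-- pv_equiv track=rewrite | github.com/InSeong-So/Algorithm | 04_Solved/4.py | solution
-- ===== SOURCE A (Python) =====
-- from heapq import heapify, heappop, heappush
-- from collections import deque
--
-- def solution(healths, items):
--     healths.sort()  # 체력을 오름차순으로 정렬
--     # list comprehension
--     items = deque(sorted([(item[1], item[0], index + 1)
--                           for index, item in enumerate(items)]))
--
--     answer = []
--     heap = []
--
--     for health in healths:  # 제일 낮은 체력부터 루프 시작
--         while items:  # 아이템 루프
--             debuff, buff, index = items[0]  # 깎는 체력이 가장 낮은 아이템
--             if health - debuff < 100:  # 조건이 안맞는다면 루프 종료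
--                 break
--             # items.pop(0)
--             items.popleft()  # O(1)
--             # max heap으로 아이템을 추가(buff 기준) O(log n)
--             heappush(heap, (-buff, index))
--         if heap:
--             _, index = heappop(heap)
--             answer.append(index)
--     return sorted(answer)
-- ===== SOURCE B (Python) =====
-- def solution(healths, items):
--     healths.sort()  # same in-place sort of healths as the original
--     n = len(items)
--     used = [False] * n
--     answer = []
--     for health in healths:
--         best = -1
--         for i in range(n):
--             if not used[i] and health - items[i][1] >= 100:
--                 if best == -1 or items[i][0] > items[best][0]:
--                     best = i
--         if best != -1:
--             used[best] = True
--             answer.append(best + 1)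
--     return sorted(answer)
-- ===== Notes on version B (the rewrite author's own statement) =====
-- stated objective: simpler
-- what changed: Replaces A's debuff-sorted deque feeding a max-heap with a plain repeated linear scan over a used-flag list: for each health (ascending) pick the unused item with debuff <= health-100 maximizing buff (smallest index on ties).
import Mathlib
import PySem

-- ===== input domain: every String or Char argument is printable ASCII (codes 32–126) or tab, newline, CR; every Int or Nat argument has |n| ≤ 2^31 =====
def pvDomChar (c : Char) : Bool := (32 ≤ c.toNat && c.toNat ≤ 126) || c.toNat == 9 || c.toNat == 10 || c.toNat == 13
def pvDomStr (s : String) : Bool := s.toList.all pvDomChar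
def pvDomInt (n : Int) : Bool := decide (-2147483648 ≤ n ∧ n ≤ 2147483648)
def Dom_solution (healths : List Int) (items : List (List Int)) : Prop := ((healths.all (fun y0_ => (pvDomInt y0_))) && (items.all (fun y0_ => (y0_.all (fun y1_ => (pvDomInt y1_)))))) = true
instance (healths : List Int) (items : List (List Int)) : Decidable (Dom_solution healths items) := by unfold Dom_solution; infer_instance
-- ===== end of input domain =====

-- B replaces A's debuff-sorted deque + max-heap sweep by a repeated linear scan over a
-- used-flag array (objective: simpler); both sort `healths` in place, equivalence is about
-- the return value.


-- ===== PORT A =====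
-- Python's lexicographic '<' on int pairs / triples (tuple comparison)
def pvPairLt (a b : Int × Int) : Bool := a.1 < b.1 || (a.1 == b.1 && a.2 < b.2)
def pvTripLt (a b : Int × Int × Int) : Bool := a.1 < b.1 || (a.1 == b.1 && pvPairLt a.2 b.2)

-- heapq on (-buff, index) pairs, ported by its priority-queue contract: heappush = ordered
-- insert, heappop = take the head (= the minimum); exact for A's result, since the heap is
-- only ever observed through heappop.
def pvHeappush (heap : List (Int × Int)) (p : Int × Int) : List (Int × Int) :=
  PySem.List.insertBy pvPairLt p heap

-- the inner `while items:` loop: pop triples while health - debuff >= 100, pushing (-buff, index)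
def pvPushLoop (health : Int) :
    List (Int × Int × Int) → List (Int × Int) → List (Int × Int × Int) × List (Int × Int)
  | [], heap => ([], heap)
  | x :: rest, heap =>
      if health - x.1 < 100 then (x :: rest, heap)
      else pvPushLoop health rest (pvHeappush heap (-x.2.1, x.2.2))

-- the `for health in healths:` loop
def pvALoop : List Int → List (Int × Int × Int) → List (Int × Int) → List Int → List Int
  | [], _, _, ans => ans
  | h :: hs, deq, heap, ans =>
      match pvPushLoop h deq heap with
      | (deq', []) => pvALoop hs deq' [] ans
      | (deq', p :: hrest) => pvALoop hs deq' hrest (ans ++ [p.2])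

def solution (healths : List Int) (items : List (List Int)) : List Int :=
  -- healths.sort() mutates the caller's list; the claim below is about the return value
  let hs := PySem.List.sorted healths (fun x => x)
  let trips := (PySem.List.enumerate items).map
      (fun e => (PySem.List.pyGetD e.2 1 0, PySem.List.pyGetD e.2 0 0, e.1 + 1))
  -- sorted(...) on the (distinct) triples: stable insertion sort by tuple order
  let deq := trips.foldl (fun acc x => PySem.List.insertBy pvTripLt x acc) []
  PySem.List.sorted (pvALoop hs deq [] []) (fun x => x)

-- ===== PORT B =====
-- the inner `for i in range(n):` scan for the best usable unused item
def pvScanBest (health : Int) (items : List (List Int)) (used : List Bool) : Int :=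
  (PySem.List.pyRange 0 (items.length : Int)).foldl
    (fun best i =>
      if PySem.List.pyGetD used i false = false ∧
          100 ≤ health - PySem.List.pyGetD (PySem.List.pyGetD items i []) 1 0 then
        if best = -1 ∨
            PySem.List.pyGetD (PySem.List.pyGetD items best []) 0 0 <
              PySem.List.pyGetD (PySem.List.pyGetD items i []) 0 0 then i else best
      else best)
    (-1)

-- the `for health in healths:` loop
def pvBLoop (items : List (List Int)) : List Int → List Bool → List Int → List Int
  | [], _, ans => ans
  | h :: hs, used, ans =>
      let best := pvScanBest h items used
      if best = -1 then pvBLoop items hs used ans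
      else pvBLoop items hs (PySem.List.pySetD used best true) (ans ++ [best + 1])

def solution_alt (healths : List Int) (items : List (List Int)) : List Int :=
  let hs := PySem.List.sorted healths (fun x => x)
  PySem.List.sorted (pvBLoop items hs (List.replicate items.length false) []) (fun x => x)

-- ===== PRECONDITION & SPEC =====
-- A evaluates item[1] for every item, so it raises IndexError when some item has fewer than
-- two entries; exactly those inputs are excluded.
def Pre_solution (healths : List Int) (items : List (List Int)) : Prop :=
  ∀ it ∈ items, 2 ≤ it.length
instance (healths : List Int) (items : List (List Int)) : Decidable (Pre_solution healths items) := by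
  unfold Pre_solution; infer_instance

def pvWitness_solution : List Int × List (List Int) := ([103, 99, 120], [[3, 5], [2, 1], [9, 30]])

def Spec_solution (healths : List Int) (items : List (List Int)) (out : List Int) : Prop :=
  out = solution_alt healths items
instance (healths : List Int) (items : List (List Int)) (out : List Int) :
    Decidable (Spec_solution healths items out) := by unfold Spec_solution; infer_instance

-- ===== CLAIM (what is proved, stated in full; the proofs are below) =====
def Claim_equal_solution : Prop := ∀ (healths : List Int) (items : List (List Int)),
  Dom_solution healths items → Pre_solution healths items →
  Spec_solution healths items (solution healths items)

-- ===== LEMMAS AND PROOFS =====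

-- item j's debuff / buff / triple / heap pair
def pvDOf (items : List (List Int)) (j : Nat) : Int := (items.getD j []).getD 1 0
def pvBOf (items : List (List Int)) (j : Nat) : Int := (items.getD j []).getD 0 0
def pvTrip (items : List (List Int)) (j : Nat) : Int × Int × Int :=
  (pvDOf items j, pvBOf items j, (j : Int) + 1)
def pvPr (items : List (List Int)) (j : Nat) : Int × Int := (-(pvBOf items j), (j : Int) + 1)

def pvPLe (a b : Int × Int) : Prop := a.1 < b.1 ∨ (a.1 = b.1 ∧ a.2 ≤ b.2)

def pvOk (items : List (List Int)) (used : List Bool) (h : Int) (j : Nat) : Prop :=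
  j < items.length ∧ used.getD j false = false ∧ pvDOf items j ≤ h - 100

def pvDeqOK (items : List (List Int)) (t : Int) (deq : List (Int × Int × Int)) : Prop :=
  deq.Pairwise (fun a b => pvTripLt a b = true) ∧
  deq.Pairwise (fun a b => a.2.2 ≠ b.2.2) ∧
  ∀ x, x ∈ deq ↔ ∃ j, j < items.length ∧ t - 100 < pvDOf items j ∧ x = pvTrip items j

def pvHeapOK (items : List (List Int)) (used : List Bool) (t : Int) (heap : List (Int × Int)) : Prop :=
  heap.Pairwise (fun a b => pvPairLt a b = true) ∧
  ∀ p, p ∈ heap ↔ ∃ j, pvOk items used t j ∧ p = pvPr items j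

def pvUsedOK (items : List (List Int)) (used : List Bool) (t : Int) : Prop :=
  used.length = items.length ∧
  ∀ j, j < items.length → used.getD j false = true → pvDOf items j ≤ t - 100

-- basic order facts
theorem pvPairLt_iff (a b : Int × Int) :
    pvPairLt a b = true ↔ (a.1 < b.1 ∨ (a.1 = b.1 ∧ a.2 < b.2)) := by
  simp [pvPairLt]

theorem pvTripLt_iff (a b : Int × Int × Int) :
    pvTripLt a b = true ↔ (a.1 < b.1 ∨ (a.1 = b.1 ∧ (a.2.1 < b.2.1 ∨ (a.2.1 = b.2.1 ∧ a.2.2 < b.2.2)))) := by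
  simp [pvTripLt, pvPairLt]

theorem pvPairLt_trans (a b c : Int × Int) (h1 : pvPairLt a b = true) (h2 : pvPairLt b c = true) :
    pvPairLt a c = true := by
  rw [pvPairLt_iff] at *; omega

theorem pvPairLt_total (a b : Int × Int) (h : a ≠ b) :
    pvPairLt a b = true ∨ pvPairLt b a = true := by
  rw [pvPairLt_iff, pvPairLt_iff]
  rcases a with ⟨a1, a2⟩; rcases b with ⟨b1, b2⟩
  by_cases h1 : a1 = b1
  · subst h1
    have h2 : a2 ≠ b2 := fun hh => h (by rw [hh])
    dsimp only
    omega
  · dsimp only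
    omega

theorem pvPairLt_irrefl (a : Int × Int) : ¬ pvPairLt a a = true := by
  rw [pvPairLt_iff]; omega

theorem pvTripLt_trans (a b c : Int × Int × Int) (h1 : pvTripLt a b = true) (h2 : pvTripLt b c = true) :
    pvTripLt a c = true := by
  rw [pvTripLt_iff] at *; omega

theorem pvTripLt_total (a b : Int × Int × Int) (h : a ≠ b) :
    pvTripLt a b = true ∨ pvTripLt b a = true := by
  rw [pvTripLt_iff, pvTripLt_iff]
  rcases a with ⟨a1, a2, a3⟩; rcases b with ⟨b1, b2, b3⟩
  by_cases h1 : a1 = b1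
  · subst h1
    by_cases h2 : a2 = b2
    · subst h2
      have h3 : a3 ≠ b3 := fun hh => h (by rw [hh])
      dsimp only
      omega
    · dsimp only
      omega
  · dsimp only
    omega

theorem pvPLe_of_lt (a b : Int × Int) (h : pvPairLt a b = true) : pvPLe a b := by
  rw [pvPairLt_iff] at h; unfold pvPLe; omega

theorem pvPLe_antisymm (a b : Int × Int) (h1 : pvPLe a b) (h2 : pvPLe b a) : a = b := by
  unfold pvPLe at *
  rcases a with ⟨a1, a2⟩; rcases b with ⟨b1, b2⟩
  simp only [Prod.mk.injEq]
  simp only at h1 h2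
  constructor <;> omega

theorem pvPr_inj (items : List (List Int)) (j j' : Nat) (h : pvPr items j = pvPr items j') : j = j' := by
  unfold pvPr at h
  have := congrArg Prod.snd h
  simp only at this
  omega

-- generic insertion-sort lemmas
theorem pv_insertBy_pairwise {α : Type} (lt : α → α → Bool)
    (htrans : ∀ a b c, lt a b = true → lt b c = true → lt a c = true)
    (htotal : ∀ a b, a ≠ b → lt a b = true ∨ lt b a = true)
    (x : α) (ys : List α) (hp : ys.Pairwise (fun a b => lt a b = true)) (hx : x ∉ ys) :
    (PySem.List.insertBy lt x ys).Pairwise (fun a b => lt a b = true) := by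
  induction ys with
  | nil => simp [PySem.List.insertBy]
  | cons y ys ih =>
    simp only [PySem.List.insertBy]
    by_cases hlt : lt x y = true
    · simp only [hlt, if_true]
      refine List.Pairwise.cons ?_ hp
      intro z hz
      rcases List.mem_cons.mp hz with hz | hz
      · subst hz; exact hlt
      · exact htrans _ _ _ hlt (List.rel_of_pairwise_cons hp hz)
    · simp only [hlt]
      have hx' : x ∉ ys := fun hm => hx (List.mem_cons_of_mem _ hm)
      have hxy : x ≠ y := fun he => hx (by rw [he]; exact List.mem_cons_self)
      refine List.Pairwise.cons ?_ (ih hp.tail hx')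
      intro z hz
      rcases (PySem.List.mem_insertBy lt x z ys).mp hz with hz | hz
      · rw [hz]
        rcases htotal x y hxy with hh | hh
        · exact absurd hh hlt
        · exact hh
      · exact List.rel_of_pairwise_cons hp hz

theorem pv_mem_foldl_insertBy {α : Type} (lt : α → α → Bool) :
    ∀ (l acc : List α) (x : α),
      x ∈ l.foldl (fun a e => PySem.List.insertBy lt e a) acc ↔ x ∈ acc ∨ x ∈ l := by
  intro l
  induction l with
  | nil => simp
  | cons e l ih =>
    intro acc x
    simp only [List.foldl_cons, ih, PySem.List.mem_insertBy, List.mem_cons]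
    tauto

theorem pv_perm_foldl_insertBy {α : Type} (lt : α → α → Bool) :
    ∀ (l acc : List α), (l.foldl (fun a e => PySem.List.insertBy lt e a) acc).Perm (l ++ acc) := by
  intro l
  induction l with
  | nil => simp
  | cons e l ih =>
    intro acc
    have h1 : (PySem.List.insertBy lt e acc).Perm (e :: acc) := by
      clear ih
      induction acc with
      | nil => simp [PySem.List.insertBy]
      | cons y ys ih2 =>
        simp only [PySem.List.insertBy]
        by_cases hlt : lt e y = true
        · simp [hlt]
        · simp only [hlt]
          exact (ih2.cons y).trans (List.Perm.swap e y ys)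
    have h2 : ((e :: l).foldl (fun a e => PySem.List.insertBy lt e a) acc)
        = l.foldl (fun a e => PySem.List.insertBy lt e a) (PySem.List.insertBy lt e acc) := rfl
    rw [h2]
    refine (ih _).trans ?_
    refine (List.Perm.append_left l h1).trans ?_
    refine List.perm_middle.trans ?_
    simp

theorem pv_pairwise_foldl_insertBy {α : Type} (lt : α → α → Bool)
    (htrans : ∀ a b c, lt a b = true → lt b c = true → lt a c = true)
    (htotal : ∀ a b, a ≠ b → lt a b = true ∨ lt b a = true) :
    ∀ (l acc : List α), acc.Pairwise (fun a b => lt a b = true) →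
      (∀ x ∈ l, x ∉ acc) → l.Pairwise (· ≠ ·) →
      (l.foldl (fun a e => PySem.List.insertBy lt e a) acc).Pairwise (fun a b => lt a b = true) := by
  intro l
  induction l with
  | nil => intro acc h _ _; simpa using h
  | cons e l ih =>
    intro acc hacc hnm hne
    simp only [List.foldl_cons]
    apply ih
    · exact pv_insertBy_pairwise lt htrans htotal e acc hacc (hnm e List.mem_cons_self)
    · intro x hx hmem
      rw [PySem.List.mem_insertBy] at hmem
      rcases hmem with hmem | hmem
      · exact (List.rel_of_pairwise_cons hne hx) hmem.symm
      · exact hnm x (List.mem_cons_of_mem _ hx) hmem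
    · exact hne.tail

-- structural spec of the inner while loop
theorem pvPushLoop_spec (h : Int) :
    ∀ (deq : List (Int × Int × Int)) (heap : List (Int × Int)),
      ∃ pre rest, deq = pre ++ rest ∧
        pvPushLoop h deq heap =
          (rest, pre.foldl (fun hp x => pvHeappush hp (-x.2.1, x.2.2)) heap) ∧
        (∀ x ∈ pre, x.1 ≤ h - 100) ∧
        (∀ y rest', rest = y :: rest' → h - y.1 < 100) := by
  intro deq
  induction deq with
  | nil =>
    intro heap
    exact ⟨[], [], rfl, rfl, by simp, by simp⟩
  | cons x d ih =>
    intro heap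
    by_cases hc : h - x.1 < 100
    · refine ⟨[], x :: d, rfl, ?_, by simp, ?_⟩
      · simp [pvPushLoop, hc]
      · intro y rest' he
        cases he; simpa using hc
    · obtain ⟨pre, rest, he1, he2, he3, he4⟩ := ih (pvHeappush heap (-x.2.1, x.2.2))
      refine ⟨x :: pre, rest, by simp [he1], ?_, ?_, he4⟩
      · simp [pvPushLoop, hc, he2]
      · intro y hy
        rcases List.mem_cons.mp hy with hy | hy
        · subst hy; omega
        · exact he3 y hy

-- getD facts
theorem pv_getD_replicate (n j : Nat) : (List.replicate n false).getD j false = false := by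
  rcases Nat.lt_or_ge j n with h | h
  · simp [List.getD, h]
  · have h2 : (List.replicate n false)[j]? = none := by
      rw [List.getElem?_eq_none_iff]; simpa using h
    simp [List.getD, h2]

theorem pv_length_pySetD {α : Type} (xs : List α) (i : Int) (v : α) :
    (PySem.List.pySetD xs i v).length = xs.length := by
  simp only [PySem.List.pySetD, PySem.List.pySet?]
  cases PySem.List.pyIdx? xs.length i <;> simp

theorem pv_getD_pySetD (used : List Bool) (j1 j : Nat) (h : j1 < used.length) :
    (PySem.List.pySetD used (j1 : Int) true).getD j false
      = if j = j1 then true else used.getD j false := by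
  have h1 := PySem.List.pyGetD_pySetD_natCast used j1 j true false h
  simp only [PySem.List.pyGetD_natCast] at h1
  exact h1

-- the scan's step function, named for the proofs (identical to the lambda in pvScanBest)
def pvScanF (h : Int) (items : List (List Int)) (used : List Bool) (best i : Int) : Int :=
  if PySem.List.pyGetD used i false = false ∧
      100 ≤ h - PySem.List.pyGetD (PySem.List.pyGetD items i []) 1 0 then
    if best = -1 ∨
        PySem.List.pyGetD (PySem.List.pyGetD items best []) 0 0 <
          PySem.List.pyGetD (PySem.List.pyGetD items i []) 0 0 then i else best
  else best

theorem pvScanBest_eq (h : Int) (items : List (List Int)) (used : List Bool) :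
    pvScanBest h items used
      = (PySem.List.pyRange 0 (items.length : Int)).foldl (pvScanF h items used) (-1) := rfl

theorem pvScanF_step (h : Int) (items : List (List Int)) (used : List Bool) (b : Int) (m : Nat) :
    pvScanF h items used b (m : Int) =
      if used.getD m false = false ∧ 100 ≤ h - pvDOf items m then
        if b = -1 ∨
            PySem.List.pyGetD (PySem.List.pyGetD items b []) 0 0 < pvBOf items m then
          (m : Int)
        else b
      else b := by
  simp only [pvScanF, PySem.List.pyGetD_natCast, PySem.List.pyGetD_ofNat']
  rfl

theorem pvScan_aux (h : Int) (items : List (List Int)) (used : List Bool) :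
    ∀ (m : Nat), m ≤ items.length →
      ((PySem.List.pyRange 0 (m : Int)).foldl (pvScanF h items used) (-1) = -1 ∧
        ∀ j, j < m → ¬ pvOk items used h j) ∨
      (∃ j0, j0 < m ∧
        (PySem.List.pyRange 0 (m : Int)).foldl (pvScanF h items used) (-1) = (j0 : Int) ∧
        pvOk items used h j0 ∧
        ∀ j, j < m → pvOk items used h j → pvPLe (pvPr items j0) (pvPr items j)) := by
  intro m
  induction m with
  | zero =>
    intro _
    left
    constructor
    · norm_num
    · omega
  | succ m ih =>
    intro hle
    have hmn : m < items.length := by omega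
    have hcast : ((m + 1 : Nat) : Int) = (m : Int) + 1 := by push_cast; ring
    rw [hcast, PySem.List.pyRange_one_succ_right (Int.natCast_nonneg m), List.foldl_append]
    simp only [List.foldl_cons, List.foldl_nil]
    rcases ih (by omega) with ⟨hB, hnone⟩ | ⟨j0, hj0, hB, hok0, hmin⟩
    · rw [hB, pvScanF_step]
      by_cases hc1 : used.getD m false = false ∧ 100 ≤ h - pvDOf items m
      · rw [if_pos hc1, if_pos (Or.inl rfl)]
        right
        refine ⟨m, by omega, rfl, ⟨hmn, hc1.1, by omega⟩, ?_⟩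
        intro j hj hok
        have hj' : j = m := by
          rcases Nat.lt_or_ge j m with hlt | _
          · exact absurd hok (hnone j hlt)
          · omega
        subst hj'
        unfold pvPLe
        right; exact ⟨rfl, le_refl _⟩
      · rw [if_neg hc1]
        left
        refine ⟨rfl, ?_⟩
        intro j hj hok
        rcases Nat.lt_or_ge j m with hlt | _
        · exact (hnone j hlt) hok
        · have hj' : j = m := by omega
          subst hj'
          exact hc1 ⟨hok.2.1, by have := hok.2.2; omega⟩
    · rw [hB, pvScanF_step]
      have hbj0 : PySem.List.pyGetD (PySem.List.pyGetD items ((j0 : Nat) : Int) []) 0 0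
          = pvBOf items j0 := by
        simp only [PySem.List.pyGetD_natCast, PySem.List.pyGetD_ofNat']
        rfl
      by_cases hc1 : used.getD m false = false ∧ 100 ≤ h - pvDOf items m
      · rw [if_pos hc1, hbj0]
        have hokm : pvOk items used h m := ⟨hmn, hc1.1, by omega⟩
        by_cases hb : pvBOf items j0 < pvBOf items m
        · rw [if_pos (Or.inr hb)]
          right
          refine ⟨m, by omega, rfl, hokm, ?_⟩
          intro j hj hok
          rcases Nat.lt_or_ge j m with hlt | _
          · have h1 := hmin j hlt hok
            unfold pvPLe pvPr at h1 ⊢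
            simp only at h1 ⊢
            omega
          · have hj' : j = m := by omega
            subst hj'
            unfold pvPLe
            right; exact ⟨rfl, le_refl _⟩
        · rw [if_neg (by
            rw [not_or]
            exact ⟨by omega, hb⟩)]
          right
          refine ⟨j0, by omega, rfl, hok0, ?_⟩
          intro j hj hok
          rcases Nat.lt_or_ge j m with hlt | _
          · exact hmin j hlt hok
          · have hj' : j = m := by omega
            subst hj'
            unfold pvPLe pvPr
            simp only
            omega
      · rw [if_neg hc1]
        right
        refine ⟨j0, by omega, rfl, hok0, ?_⟩
        intro j hj hok
        rcases Nat.lt_or_ge j m with hlt | _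
        · exact hmin j hlt hok
        · have hj' : j = m := by omega
          subst hj'
          exact absurd ⟨hok.2.1, by have := hok.2.2; omega⟩ hc1

-- the linear scan computes the (-buff, index)-minimal usable unused item
theorem pvScanBest_spec (h : Int) (items : List (List Int)) (used : List Bool) :
    (pvScanBest h items used = -1 ∧ ∀ j, j < items.length → ¬ pvOk items used h j) ∨
    (∃ j0, j0 < items.length ∧ pvScanBest h items used = (j0 : Int) ∧ pvOk items used h j0 ∧
      ∀ j, j < items.length → pvOk items used h j → pvPLe (pvPr items j0) (pvPr items j)) := by
  rw [pvScanBest_eq]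
  exact pvScan_aux h items used items.length (le_refl _)

-- one unfolding of pvBLoop
theorem pvBLoop_cons (items : List (List Int)) (h : Int) (hs : List Int)
    (used : List Bool) (ans : List Int) :
    pvBLoop items (h :: hs) used ans
      = if pvScanBest h items used = -1 then pvBLoop items hs used ans
        else pvBLoop items hs (PySem.List.pySetD used (pvScanBest h items used) true)
               (ans ++ [pvScanBest h items used + 1]) := rfl

-- the synchronized loop: A's deque/heap sweep equals B's flag scan
theorem pv_loop_eq (items : List (List Int)) :
    ∀ (hs : List Int) (deq : List (Int × Int × Int)) (heap : List (Int × Int))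
      (used : List Bool) (ans : List Int) (t : Int),
      hs.Pairwise (· ≤ ·) → (∀ h ∈ hs, t ≤ h) →
      pvDeqOK items t deq → pvHeapOK items used t heap → pvUsedOK items used t →
      pvALoop hs deq heap ans = pvBLoop items hs used ans := by
  intro hs
  induction hs with
  | nil => intro deq heap used ans t _ _ _ _ _; rfl
  | cons h hsr ih =>
    intro deq heap used ans t hsort hge hdeq hheap hused
    obtain ⟨hdP, hdN, hdM⟩ := hdeq
    obtain ⟨hhP, hhM⟩ := hheap
    obtain ⟨huL, huT⟩ := hused
    have hth : t ≤ h := hge h List.mem_cons_self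
    obtain ⟨pre, rest, hsplit, hpush, hpre, hrest⟩ := pvPushLoop_spec h deq heap
    -- every triple left in the deque fails the eligibility test at h
    have hrest' : ∀ x ∈ rest, h - 100 < x.1 := by
      cases rest with
      | nil => intro x hx; simp at hx
      | cons y r' =>
        have hy := hrest y r' rfl
        have hPr : (y :: r').Pairwise (fun a b => pvTripLt a b = true) :=
          hdP.sublist (by rw [hsplit]; exact List.sublist_append_right _ _)
        intro x hx
        rcases List.mem_cons.mp hx with hx | hx
        · subst hx; omega
        · have hyx := List.rel_of_pairwise_cons hPr hx
          rw [pvTripLt_iff] at hyx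
          omega
    have hpreD : ∀ x ∈ pre, x ∈ deq := by
      intro x hx; rw [hsplit]; exact List.mem_append_left _ hx
    have hrestD : ∀ x ∈ rest, x ∈ deq := by
      intro x hx; rw [hsplit]; exact List.mem_append_right _ hx
    -- the heap after the pushes, as a fold of ordered inserts over mapped elements
    have hfm : pre.foldl (fun hp x => pvHeappush hp (-x.2.1, x.2.2)) heap
        = (pre.map (fun x => ((-x.2.1 : Int), x.2.2))).foldl
            (fun a e => PySem.List.insertBy pvPairLt e a) heap := by
      rw [List.foldl_map]; rfl
    -- membership in the new heap
    have hmemH' : ∀ p, p ∈ pre.foldl (fun hp x => pvHeappush hp (-x.2.1, x.2.2)) heap ↔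
        p ∈ heap ∨ ∃ x ∈ pre, p = ((-x.2.1 : Int), x.2.2) := by
      intro p
      rw [hfm, pv_mem_foldl_insertBy]
      simp only [List.mem_map]
      constructor
      · rintro (hp | ⟨x, hx, he⟩)
        · exact Or.inl hp
        · exact Or.inr ⟨x, hx, he.symm⟩
      · rintro (hp | ⟨x, hx, he⟩)
        · exact Or.inl hp
        · exact Or.inr ⟨x, hx, he.symm⟩
    -- the new heap holds exactly the usable unused items at h
    have hmem2 : ∀ p, p ∈ pre.foldl (fun hp x => pvHeappush hp (-x.2.1, x.2.2)) heap ↔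
        ∃ j, pvOk items used h j ∧ p = pvPr items j := by
      intro p
      rw [hmemH']
      constructor
      · rintro (hp | ⟨x, hx, rfl⟩)
        · obtain ⟨j, ⟨hjl, hju, hjd⟩, rfl⟩ := (hhM p).mp hp
          exact ⟨j, ⟨hjl, hju, by omega⟩, rfl⟩
        · obtain ⟨j, hjl, hjgt, rfl⟩ := (hdM x).mp (hpreD x hx)
          refine ⟨j, ⟨hjl, ?_, ?_⟩, rfl⟩
          · by_contra hu
            have hu' : used.getD j false = true := by
              revert hu; cases used.getD j false <;> simp
            have := huT j hjl hu'
            omega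
          · exact hpre _ hx
      · rintro ⟨j, ⟨hjl, hju, hjd⟩, rfl⟩
        by_cases hc : pvDOf items j ≤ t - 100
        · exact Or.inl ((hhM _).mpr ⟨j, ⟨hjl, hju, hc⟩, rfl⟩)
        · have hmemdeq : pvTrip items j ∈ deq := (hdM _).mpr ⟨j, hjl, by omega, rfl⟩
          rw [hsplit] at hmemdeq
          rcases List.mem_append.mp hmemdeq with hin | hin
          · exact Or.inr ⟨_, hin, rfl⟩
          · have h1 := hrest' _ hin
            have h2 : (pvTrip items j).1 = pvDOf items j := rfl
            omega
    -- the new heap is strictly sorted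
    have hP' : (pre.foldl (fun hp x => pvHeappush hp (-x.2.1, x.2.2)) heap).Pairwise
        (fun a b => pvPairLt a b = true) := by
      rw [hfm]
      have hpreN : pre.Pairwise (fun a b => a.2.2 ≠ b.2.2) :=
        hdN.sublist (by rw [hsplit]; exact List.sublist_append_left _ _)
      have hmapsN : (pre.map (fun x => ((-x.2.1 : Int), x.2.2))).Pairwise (· ≠ ·) := by
        refine List.Pairwise.map _ ?_ hpreN
        intro a b hne heq
        injection heq with h1 h2
        exact hne h2
      have hfresh : ∀ q ∈ pre.map (fun x => ((-x.2.1 : Int), x.2.2)), q ∉ heap := by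
        intro q hq hqh
        obtain ⟨x, hx, rfl⟩ := List.mem_map.mp hq
        obtain ⟨j, hjl, hjgt, rfl⟩ := (hdM x).mp (hpreD x hx)
        obtain ⟨j', ⟨hj'l, hj'u, hj'd⟩, heq⟩ := (hhM _).mp hqh
        have hjj : j = j' := pvPr_inj items j j' heq
        subst hjj
        omega
      exact pv_pairwise_foldl_insertBy pvPairLt pvPairLt_trans pvPairLt_total
        (pre.map (fun x => ((-x.2.1 : Int), x.2.2))) heap hhP hfresh hmapsN
    -- the remaining deque is correct at h
    have hdeq' : pvDeqOK items h rest := by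
      refine ⟨hdP.sublist (by rw [hsplit]; exact List.sublist_append_right _ _),
              hdN.sublist (by rw [hsplit]; exact List.sublist_append_right _ _), ?_⟩
      intro x
      constructor
      · intro hx
        obtain ⟨j, hjl, hjgt, rfl⟩ := (hdM x).mp (hrestD x hx)
        have h1 := hrest' _ hx
        have h2 : (pvTrip items j).1 = pvDOf items j := rfl
        exact ⟨j, hjl, by omega, rfl⟩
      · rintro ⟨j, hjl, hjgt, rfl⟩
        have hmem : pvTrip items j ∈ deq := (hdM _).mpr ⟨j, hjl, by omega, rfl⟩
        rw [hsplit] at hmem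
        rcases List.mem_append.mp hmem with hin | hin
        · have h1 := hpre _ hin
          have h2 : (pvTrip items j).1 = pvDOf items j := rfl
          omega
        · exact hin
    have hsort' : hsr.Pairwise (· ≤ ·) := hsort.of_cons
    have hge' : ∀ x ∈ hsr, h ≤ x := fun x hx => List.rel_of_pairwise_cons hsort hx
    rcases hcase : pre.foldl (fun hp x => pvHeappush hp (-x.2.1, x.2.2)) heap with _ | ⟨p0, hr⟩
    · -- no usable item: neither loop appends
      rw [hcase] at hpush hmem2
      have hA : pvALoop (h :: hsr) deq heap ans = pvALoop hsr rest [] ans := by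
        simp only [pvALoop]
        rw [hpush]
      have hscan : pvScanBest h items used = -1 := by
        rcases pvScanBest_spec h items used with ⟨he, _⟩ | ⟨j0, hj0n, heq, hok0, _⟩
        · exact he
        · exfalso
          have := (hmem2 (pvPr items j0)).mpr ⟨j0, hok0, rfl⟩
          simp at this
      rw [hA, pvBLoop_cons, hscan, if_pos rfl]
      refine ih rest [] used ans h hsort' hge' hdeq' ⟨List.Pairwise.nil, hmem2⟩
        ⟨huL, fun j hj hu => by have := huT j hj hu; omega⟩
    · -- the heap pop and the scan pick the same item
      rw [hcase] at hpush hmem2 hP'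
      obtain ⟨j0, hok0, hp0⟩ := (hmem2 p0).mp List.mem_cons_self
      have hminH : ∀ j, pvOk items used h j → pvPLe (pvPr items j0) (pvPr items j) := by
        intro j hok
        have hmem : pvPr items j ∈ p0 :: hr := (hmem2 _).mpr ⟨j, hok, rfl⟩
        rcases List.mem_cons.mp hmem with he | hin
        · rw [hp0] at he
          rw [← he]
          unfold pvPLe
          right; exact ⟨rfl, le_refl _⟩
        · have hrel := List.rel_of_pairwise_cons hP' hin
          rw [hp0] at hrel
          exact pvPLe_of_lt _ _ hrel
      rcases pvScanBest_spec h items used with ⟨_, hnone⟩ | ⟨j1, hj1n, hseq, hok1, hmin1⟩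
      · exact absurd hok0 (hnone j0 hok0.1)
      have hj10 : j1 = j0 :=
        pvPr_inj items j1 j0 (pvPLe_antisymm _ _ (hmin1 j0 hok0.1 hok0) (hminH j1 hok1))
      subst hj10
      have hA : pvALoop (h :: hsr) deq heap ans = pvALoop hsr rest hr (ans ++ [p0.2]) := by
        simp only [pvALoop]
        rw [hpush]
      have hp02 : p0.2 = (j1 : Int) + 1 := by rw [hp0]; rfl
      have hne : pvScanBest h items used ≠ -1 := by rw [hseq]; omega
      rw [hA, pvBLoop_cons, if_neg hne, hseq, hp02]
      have hj1len : j1 < used.length := by rw [huL]; exact hok0.1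
      have hget' : ∀ j : Nat, (PySem.List.pySetD used ((j1 : Nat) : Int) true).getD j false
          = if j = j1 then true else used.getD j false := fun j => pv_getD_pySetD used j1 j hj1len
      have hused' : pvUsedOK items (PySem.List.pySetD used ((j1 : Nat) : Int) true) h := by
        refine ⟨by rw [pv_length_pySetD, huL], ?_⟩
        intro j hjl hu
        rw [hget'] at hu
        by_cases hjj : j = j1
        · subst hjj
          exact hok0.2.2
        · rw [if_neg hjj] at hu
          have := huT j hjl hu
          omega
      have hheap' : pvHeapOK items (PySem.List.pySetD used ((j1 : Nat) : Int) true) h hr := by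
        refine ⟨(List.pairwise_cons.mp hP').2, ?_⟩
        intro p
        constructor
        · intro hin
          obtain ⟨j, hok, rfl⟩ := (hmem2 p).mp (List.mem_cons_of_mem _ hin)
          have hjj : j ≠ j1 := by
            intro he
            have hrel := List.rel_of_pairwise_cons hP' hin
            rw [he, ← hp0] at hrel
            exact pvPairLt_irrefl p0 hrel
          exact ⟨j, ⟨hok.1, by rw [hget', if_neg hjj]; exact hok.2.1, hok.2.2⟩, rfl⟩
        · rintro ⟨j, ⟨hjl, hu', hd⟩, rfl⟩
          have hjj : j ≠ j1 := by
            intro he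
            rw [hget', if_pos he] at hu'
            simp at hu'
          have hu : used.getD j false = false := by
            rw [hget', if_neg hjj] at hu'
            exact hu'
          have hp' : pvPr items j ∈ p0 :: hr := (hmem2 _).mpr ⟨j, ⟨hjl, hu, hd⟩, rfl⟩
          rcases List.mem_cons.mp hp' with he | hin
          · exact absurd (pvPr_inj items j j1 (by rw [← hp0]; exact he)) hjj
          · exact hin
      exact ih rest hr (PySem.List.pySetD used ((j1 : Nat) : Int) true)
        (ans ++ [(j1 : Int) + 1]) h hsort' hge' hdeq' hheap' hused'

-- ===== VERDICT (by name: the statement is the Claim_ definition above) =====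
theorem solution_spec : Claim_equal_solution := by
  unfold Claim_equal_solution
  intro healths items hDom hPre
  unfold Spec_solution
  simp only [Dom_solution, Bool.and_eq_true, List.all_eq_true, pvDomInt,
    decide_eq_true_eq] at hDom
  obtain ⟨hH, hI⟩ := hDom
  have hPre' : ∀ it ∈ items, 2 ≤ it.length := hPre
  have hDItem : ∀ j, j < items.length → -2147483648 ≤ pvDOf items j := by
    intro j hj
    have hlen : 2 ≤ items[j].length := hPre' _ (items.getElem_mem hj)
    have h1lt : 1 < items[j].length := by omega
    unfold pvDOf
    rw [List.getD_eq_getElem items [] hj, List.getD_eq_getElem items[j] 0 h1lt]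
    exact (hI _ (items.getElem_mem hj) _ (List.getElem_mem h1lt)).1
  have htr : ∀ x, x ∈ (PySem.List.enumerate items).map
      (fun e => (PySem.List.pyGetD e.2 1 0, PySem.List.pyGetD e.2 0 0, e.1 + 1)) ↔
      ∃ j, j < items.length ∧ x = pvTrip items j := by
    intro x
    rw [List.mem_map]
    constructor
    · rintro ⟨e, he, rfl⟩
      rw [PySem.List.mem_enumerate_iff] at he
      obtain ⟨k, hk, rfl⟩ := he
      refine ⟨k, hk, ?_⟩
      unfold pvTrip pvDOf pvBOf
      rw [List.getD_eq_getElem items [] hk]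
      simp only [PySem.List.pyGetD_ofNat']
      norm_num
    · rintro ⟨j, hj, rfl⟩
      refine ⟨((0 : Int) + (j : Int), items[j]), ?_, ?_⟩
      · rw [PySem.List.mem_enumerate_iff]
        exact ⟨j, hj, rfl⟩
      · unfold pvTrip pvDOf pvBOf
        rw [List.getD_eq_getElem items [] hj]
        simp only [PySem.List.pyGetD_ofNat']
        norm_num
  have htN2 : ((PySem.List.enumerate items).map
      (fun e => (PySem.List.pyGetD e.2 1 0, PySem.List.pyGetD e.2 0 0, e.1 + 1))).Pairwise
      (fun a b => a.2.2 ≠ b.2.2) := by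
    refine List.Pairwise.map _ ?_ (PySem.List.pairwise_lt_enumerate items 0)
    intro a b hab heq
    have hne : ¬ (a.1 + 1 = b.1 + 1) := by omega
    exact hne heq
  have htN : ((PySem.List.enumerate items).map
      (fun e => (PySem.List.pyGetD e.2 1 0, PySem.List.pyGetD e.2 0 0, e.1 + 1))).Pairwise
      (· ≠ ·) := htN2.imp (fun h he => h (by rw [he]))
  have hdqP := pv_pairwise_foldl_insertBy pvTripLt pvTripLt_trans pvTripLt_total
    ((PySem.List.enumerate items).map
      (fun e => (PySem.List.pyGetD e.2 1 0, PySem.List.pyGetD e.2 0 0, e.1 + 1))) []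
    List.Pairwise.nil (fun x _ hx => by simp at hx) htN
  have hdqPerm := pv_perm_foldl_insertBy pvTripLt
    ((PySem.List.enumerate items).map
      (fun e => (PySem.List.pyGetD e.2 1 0, PySem.List.pyGetD e.2 0 0, e.1 + 1))) []
  rw [List.append_nil] at hdqPerm
  have hdqN := (List.Perm.pairwise_iff
      (R := fun (a b : Int × Int × Int) => a.2.2 ≠ b.2.2)
      (fun hab he => hab he.symm) hdqPerm).mpr htN2
  show PySem.List.sorted
      (pvALoop (PySem.List.sorted healths (fun x => x))
        (((PySem.List.enumerate items).map
            (fun e => (PySem.List.pyGetD e.2 1 0, PySem.List.pyGetD e.2 0 0, e.1 + 1))).foldl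
          (fun acc x => PySem.List.insertBy pvTripLt x acc) [])
        [] [])
      (fun x => x)
    = PySem.List.sorted
        (pvBLoop items (PySem.List.sorted healths (fun x => x))
          (List.replicate items.length false) [])
        (fun x => x)
  refine congrArg (fun l => PySem.List.sorted l (fun x => x)) ?_
  refine pv_loop_eq items _ _ _ _ _ (-2147483648) ?_ ?_ ?_ ?_ ?_
  · exact PySem.List.sorted_pairwise healths (fun x => x)
  · intro x hx
    rw [PySem.List.mem_sorted] at hx
    have := hH x hx
    omega
  · refine ⟨hdqP, hdqN, ?_⟩
    intro x
    rw [pv_mem_foldl_insertBy]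
    constructor
    · intro hx
      rcases hx with hx | hx
      · simp at hx
      · obtain ⟨j, hj, rfl⟩ := (htr x).mp hx
        exact ⟨j, hj, by have := hDItem j hj; omega, rfl⟩
    · rintro ⟨j, hj, _, rfl⟩
      exact Or.inr ((htr _).mpr ⟨j, hj, rfl⟩)
  · refine ⟨List.Pairwise.nil, ?_⟩
    intro p
    constructor
    · intro hp; simp at hp
    · rintro ⟨j, hok, _⟩
      obtain ⟨hjl, _, hjd⟩ := hok
      have := hDItem j hjl
      omega
  · refine ⟨by simp, ?_⟩
    intro j hj hu
    rw [pv_getD_replicate] at hu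
    exact Bool.noConfusion hu
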